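-- pv_equiv track=rewrite | github.com/dingsheng-ong/kattis-attempts | flipfive.py | solve
-- ===== SOURCE A (Python) =====
-- from copy import deepcopy as copy
--
-- def flip(m, i, j):
-- 	m_ = copy(m)
-- 	for x, y in [(-1,0),(0,-1),(0,0),(1,0),(0,1)]:
-- 		if i + x < 0 or i + x > 2: continue
-- 		if j + y < 0 or j + y > 2: continue
-- 		m_[i+x][j+y] = not m_[i+x][j+y]
-- 	return m_
--
-- def hash(m):
-- 	return sum([m[i // 3][i % 3] * 2 ** i for i in range(9)])
--
-- def solve(M):
-- 	if all(map(lambda k: not any(k), M)):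
-- 		return 0
--
-- 	S = [(M, 0)]
-- 	H = []
--
-- 	while len(S):
-- 		m, n = S.pop(0)
-- 		v = hash(m)
-- 		if v in H:
-- 			continue
-- 		else:
-- 			H.append(v)
--
-- 		for i in range(3):
-- 			for j in range(3):
-- 				m_ = flip(m, i, j)
-- 				if all(map(lambda k: not any(k), m_)):
-- 					return n + 1
-- 				S.append((m_, n + 1))
-- ===== SOURCE B (Python) =====
-- def solve(M):
--     # already clear: 0 presses
--     if not any(any(row) for row in M):
--         return 0
--     # encode the 3x3 board as a 9-bit integer, bit 3*i+j = cell (i,j)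
--     code = 0
--     for i in range(3):
--         for j in range(3):
--             if M[i][j]:
--                 code |= 1 << (3 * i + j)
--     # plus-shaped toggle mask of each of the 9 buttons, boundary-clipped
--     masks = []
--     for i in range(3):
--         for j in range(3):
--             m = 1 << (3 * i + j)
--             if i > 0: m |= 1 << (3 * (i - 1) + j)
--             if i < 2: m |= 1 << (3 * (i + 1) + j)
--             if j > 0: m |= 1 << (3 * i + j - 1)
--             if j < 2: m |= 1 << (3 * i + j + 1)
--             masks.append(m)
--     # try all 512 press subsets, keep the smallest that clears the board
--     best = 9
--     for s in range(512):
--         v = code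
--         k = 0
--         for b in range(9):
--             if (s >> b) & 1:
--                 v ^= masks[b]
--                 k += 1
--         if v == 0 and k < best:
--             best = k
--     return best
-- ===== Notes on version B (the rewrite author's own statement) =====
-- stated objective: alternative
-- what changed: Replaces A's breadth-first search over board states (queue of boards, visited-hash list) by a direct enumeration of all 512 button-press subsets on a 9-bit integer encoding of the board, XORing precomputed plus-shaped toggle masks and returning the minimum popcount of a subset that clears the board.
import Mathlib
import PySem

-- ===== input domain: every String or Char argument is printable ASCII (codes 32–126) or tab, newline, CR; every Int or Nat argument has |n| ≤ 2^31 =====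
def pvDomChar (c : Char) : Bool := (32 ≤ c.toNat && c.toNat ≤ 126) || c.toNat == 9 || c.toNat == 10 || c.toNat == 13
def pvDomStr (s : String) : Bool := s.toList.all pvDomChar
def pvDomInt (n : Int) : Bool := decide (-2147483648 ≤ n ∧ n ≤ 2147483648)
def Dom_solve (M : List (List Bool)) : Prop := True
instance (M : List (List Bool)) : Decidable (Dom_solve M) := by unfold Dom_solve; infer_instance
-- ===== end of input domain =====

-- B replaces A's breadth-first search over board states by a direct enumeration of all
-- 512 button-press subsets on a 9-bit board encoding, returning the minimum popcount
-- of a subset whose XORed toggle masks clear the board ('alternative' objective).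

-- ===== PORT A =====
def pyFlip (m : List (List Bool)) (i j : Nat) : List (List Bool) :=
  [((-1:Int),(0:Int)),(0,-1),(0,0),(1,0),(0,1)].foldl (fun m_ xy =>
    let a : Int := (i : Int) + xy.1
    let b : Int := (j : Int) + xy.2
    if a < 0 ∨ a > 2 then m_
    else if b < 0 ∨ b > 2 then m_
    else
      let row := m_.getD a.toNat []
      m_.set a.toNat (row.set b.toNat (!(row.getD b.toNat false)))) m

def pyHash (m : List (List Bool)) : Int :=
  ((List.range 9).map (fun i =>
    (if (m.getD (i / 3) []).getD (i % 3) false then (1:Int) else 0) * 2 ^ i)).sum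

def allClearA (M : List (List Bool)) : Bool := M.all (fun k => !(k.any id))

def pairsA : List (Nat × Nat) := (List.range 3).flatMap (fun i => (List.range 3).map (fun j => (i, j)))

def expandA (m : List (List Bool)) (n : Int) :
    List (Nat × Nat) → List (List (List Bool) × Int) → Sum Int (List (List (List Bool) × Int))
  | [], S => .inr S
  | (i, j) :: ps, S =>
      let m_ := pyFlip m i j
      if allClearA m_ then .inl (n + 1)
      else expandA m n ps (S ++ [(m_, n + 1)])

-- the Python 'while' loop, with fuel (the loop always returns long before 100000 iterations;
-- if the queue empties Python would return None, which Pre_solve excludes)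
def bfsA : Nat → List (List (List Bool) × Int) → List Int → Int
  | 0, _, _ => 0
  | _ + 1, [], _ => 0
  | f + 1, (m, n) :: S, H =>
      let v := pyHash m
      if v ∈ H then bfsA f S H
      else
        let H' := H ++ [v]
        match expandA m n pairsA S with
        | .inl r => r
        | .inr S' => bfsA f S' H'

def solve (M : List (List Bool)) : Int :=
  if allClearA M then 0 else bfsA 100000 [(M, 0)] []

-- ===== PORT B =====
def masksB : List Nat :=
  (List.range 3).foldl (fun acc i => (List.range 3).foldl (fun acc j =>
    let m := 1 <<< (3*i+j)
    let m := if i > 0 then m ||| 1 <<< (3*(i-1)+j) else m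
    let m := if i < 2 then m ||| 1 <<< (3*(i+1)+j) else m
    let m := if j > 0 then m ||| 1 <<< (3*i+j-1) else m
    let m := if j < 2 then m ||| 1 <<< (3*i+j+1) else m
    acc ++ [m]) acc) []

def allClearB (M : List (List Bool)) : Bool := !(M.any (fun row => row.any id))

def codeB (M : List (List Bool)) : Nat :=
  (List.range 3).foldl (fun code i => (List.range 3).foldl (fun code j =>
    if (M.getD i []).getD j false then code ||| (1 <<< (3*i+j)) else code) code) 0

def bestLoop (code : Nat) : Nat :=
  (List.range 512).foldl (fun best s =>
    let vk := (List.range 9).foldl (fun (vk : Nat × Nat) b =>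
      if (s >>> b) &&& 1 = 1 then (vk.1 ^^^ masksB.getD b 0, vk.2 + 1) else vk) (code, 0)
    if vk.1 = 0 ∧ vk.2 < best then vk.2 else best) 9

def solve_alt (M : List (List Bool)) : Int :=
  if allClearB M then 0 else (bestLoop (codeB M) : Int)

-- ===== PRECONDITION & SPEC =====
-- Pre_solve admits exactly the boards on which A returns an int: boards with at least 3 rows,
-- the first three of length at least 3, whose cells outside the top-left 3x3 are all False
-- (A solves the top-left 3x3 and the False padding is carried along unchanged), and
-- entirely-False boards of any shape (A returns 0 from its initial check). On every other
-- board A raises IndexError (a row or cell read off the end) or terminates without a return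
-- (returning None, not an int): padding holding a True cell can never be cleared.
def Pre_solve (M : List (List Bool)) : Prop :=
  (3 ≤ M.length ∧ (∀ r ∈ M.take 3, 3 ≤ r.length) ∧
    (∀ r ∈ M.take 3, ∀ c ∈ r.drop 3, c = false) ∧
    (∀ r ∈ M.drop 3, ∀ c ∈ r, c = false)) ∨
  (∀ r ∈ M, ∀ c ∈ r, c = false)
instance (M : List (List Bool)) : Decidable (Pre_solve M) := by unfold Pre_solve; infer_instance

def pvWitness_solve : List (List Bool) :=
  [[true, false, false], [false, false, false], [false, false, false]]

def Spec_solve (M : List (List Bool)) (out : Int) : Prop := out = solve_alt M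
instance (M : List (List Bool)) (out : Int) : Decidable (Spec_solve M out) := by unfold Spec_solve; infer_instance

-- ===== CLAIM (what is proved, stated in full; the proofs are below) =====
def Claim_equal_solve : Prop := ∀ (M : List (List Bool)), Dom_solve M → Pre_solve M → Spec_solve M (solve M)

-- ===== LEMMAS AND PROOFS =====

-- ---- abstract 9-bit world (proof-side helpers) ----
def XB (s : Nat) : Nat :=
  (List.range 9).foldl (fun v b => if (s >>> b) &&& 1 = 1 then v ^^^ masksB.getD b 0 else v) 0

def kpop (s : Nat) : Nat :=
  (List.range 9).foldl (fun k b => if (s >>> b) &&& 1 = 1 then k + 1 else k) 0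

def boardOf (v : Nat) : List (List Bool) :=
  [[v.testBit 0, v.testBit 1, v.testBit 2],
   [v.testBit 3, v.testBit 4, v.testBit 5],
   [v.testBit 6, v.testBit 7, v.testBit 8]]

-- a board of the shape Pre_solve admits: a 3x3 core extended by the (all-False) row tails
-- t0 t1 t2 and the (all-False) extra rows R; pyFlip passes the tails through unchanged
def addTails (t0 t1 t2 : List Bool) (R : List (List Bool)) (m : List (List Bool)) : List (List Bool) :=
  (m.getD 0 [] ++ t0) :: (m.getD 1 [] ++ t1) :: (m.getD 2 [] ++ t2) :: R

def invT : List (List (List Nat)) := [[[0, 229, 464, 309, 397, 360, 93, 184], [308, 465, 228, 1, 185, 92, 361, 396], [186, 95, 362, 399, 311, 466, 231, 2], [398, 363, 94, 187, 3, 230, 467, 310], [89, 188, 393, 364, 468, 305, 4, 225], [365, 392, 189, 88, 224, 5, 304, 469], [227, 6, 307, 470, 366, 395, 190, 91], [471, 306, 7, 226, 90, 191, 394, 367]], [[355, 390, 179, 86, 238, 11, 318, 475], [87, 178, 391, 354, 474, 319, 10, 239], [473, 316, 9, 236, 84, 177, 388, 353], [237, 8, 317, 472, 352, 389, 176, 85],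 [314, 479, 234, 15, 183, 82, 359, 386], [14, 235, 478, 315, 387, 358, 83, 182], [384, 357, 80, 181, 13, 232, 477, 312], [180, 81, 356, 385, 313, 476, 233, 12]], [[23, 242, 455, 290, 410, 383, 74, 175], [291, 454, 243, 22, 174, 75, 382, 411], [173, 72, 381, 408, 288, 453, 240, 21], [409, 380, 73, 172, 20, 241, 452, 289], [78, 171, 414, 379, 451, 294, 19, 246], [378, 415, 170, 79, 247, 18, 295, 450], [244, 17, 292, 449, 377, 412, 169, 76], [448, 293, 16, 245, 77, 168, 413, 376]], [[372, 401, 164, 65, 249, 28, 297, 460], [64, 165, 400, 373, 461, 296, 29, 248], [462, 299, 30, 251, 67, 166, 403, 374], [250, 31, 298, 463, 375, 402, 167, 66], [301, 456, 253, 24, 160, 69, 368, 405], [25, 252, 457, 300, 404, 369, 68, 161], [407, 370, 71, 162, 26, 255, 458, 303], [163, 70, 371, 406, 302, 459, 254, 27]], [[334, 427, 158, 123, 195, 38, 275, 502], [122, 159, 426, 335, 503, 274, 39, 194], [500, 273, 36, 193, 121, 156, 425, 332], [192, 37, 272, 501, 333, 424, 157, 120], [279, 498, 199, 34, 154, 127,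 330, 431], [35, 198, 499, 278, 430, 331, 126, 155], [429, 328, 125, 152, 32, 197, 496, 277], [153, 124, 329, 428, 276, 497, 196, 33]], [[45, 200, 509, 280, 416, 325, 112, 149], [281, 508, 201, 44, 148, 113, 324, 417], [151, 114, 327, 418, 282, 511, 202, 47], [419, 326, 115, 150, 46, 203, 510, 283], [116, 145, 420, 321, 505, 284, 41, 204], [320, 421, 144, 117, 205, 40, 285, 504], [206, 43, 286, 507, 323, 422, 147, 118], [506, 287, 42, 207, 119, 146, 423, 322]], [[345, 444, 137, 108, 212, 49, 260, 481], [109, 136, 445, 344, 480, 261, 48, 213], [483, 262, 51, 214, 110, 139, 446, 347], [215, 50, 263, 482, 346, 447, 138, 111], [256, 485, 208, 53, 141, 104, 349, 440], [52, 209, 484, 257, 441, 348, 105, 140], [442, 351, 106, 143, 55, 210, 487, 258], [142, 107, 350, 443, 259, 486, 211, 54]], [[58, 223, 490, 271, 439, 338, 103, 130], [270, 491, 222, 59, 131, 102, 339, 438], [128, 101, 336, 437, 269, 488, 221, 56], [436, 337, 100, 129, 57, 220, 489, 268], [99, 134, 435, 342, 494, 267, 62, 219], [343, 434, 135, 98,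 218, 63, 266, 495], [217, 60, 265, 492, 340, 433, 132, 97], [493, 264, 61, 216, 96, 133, 432, 341]]]

def invB (v : Nat) : Nat := ((invT.getD (v / 64) []).getD (v / 8 % 8) []).getD (v % 8) 0


-- ---- small decidable facts about the 9-bit world ----
set_option maxRecDepth 10000 in
theorem masks_lt : ∀ b : Fin 9, masksB.getD b.val 0 < 512 := by decide

set_option maxRecDepth 10000 in
theorem bit_lt : ∀ b : Fin 9, (1 <<< b.val) < 512 := by decide

set_option maxRecDepth 10000 in
set_option maxHeartbeats 8000000 in
theorem xhom : ∀ (s : Fin 512) (b : Fin 9),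
    XB (s.val ^^^ (1 <<< b.val)) = XB s.val ^^^ masksB.getD b.val 0 := by decide

set_option maxRecDepth 10000 in
set_option maxHeartbeats 8000000 in
theorem kflip_set : ∀ (s : Fin 512) (b : Fin 9), (s.val >>> b.val) &&& 1 = 1 →
    kpop (s.val ^^^ (1 <<< b.val)) + 1 = kpop s.val := by decide

set_option maxRecDepth 10000 in
set_option maxHeartbeats 8000000 in
theorem kflip_unset : ∀ (s : Fin 512) (b : Fin 9), (s.val >>> b.val) &&& 1 = 0 →
    kpop (s.val ^^^ (1 <<< b.val)) = kpop s.val + 1 := by decide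

set_option maxRecDepth 10000 in
theorem kzero : ∀ s : Fin 512, kpop s.val = 0 → s.val = 0 := by decide

set_option maxRecDepth 10000 in
theorem kle : ∀ s : Fin 512, kpop s.val ≤ 9 := by decide

set_option maxRecDepth 10000 in
set_option maxHeartbeats 8000000 in
theorem inv_ok : ∀ v : Fin 512, invB v.val < 512 ∧ XB (invB v.val) = v.val := by decide

set_option maxRecDepth 10000 in
theorem exists_bit : ∀ s : Fin 512, s.val ≠ 0 → ∃ b : Fin 9, (s.val >>> b.val) &&& 1 = 1 := by decide

set_option maxRecDepth 10000 in
theorem mem_pairs : ∀ b : Fin 9, (b.val / 3, b.val % 3) ∈ pairsA := by decide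

set_option maxRecDepth 10000 in
theorem pairs_lt : ∀ p ∈ pairsA, p.1 < 3 ∧ p.2 < 3 := by decide

theorem xor_lt512 {a b : Nat} (ha : a < 512) (hb : b < 512) : a ^^^ b < 512 := by
  have : a ^^^ b < 2 ^ 9 := Nat.xor_lt_two_pow (by norm_num [ha]) (by norm_num [hb])
  simpa using this

-- ---- board ↔ code bridge ----
set_option maxRecDepth 10000 in
set_option maxHeartbeats 16000000 in
theorem bfF : ∀ (v : Fin 512) (x y : Fin 3),
    pyFlip (boardOf v.val) x.val y.val = boardOf (v.val ^^^ masksB.getD (3*x.val+y.val) 0) := by decide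

set_option maxRecDepth 10000 in
set_option maxHeartbeats 16000000 in
theorem btF : ∀ v : Fin 512, pyHash (boardOf v.val) = (v.val : Int) := by decide

set_option maxRecDepth 10000 in
set_option maxHeartbeats 8000000 in
theorem bclearF : ∀ v : Fin 512, allClearA (boardOf v.val) = (v.val == 0) := by decide

set_option maxRecDepth 10000 in
set_option maxHeartbeats 16000000 in
theorem idB : ∀ a b c d e f g h i : Bool,
    boardOf (codeB [[a,b,c],[d,e,f],[g,h,i]]) = [[a,b,c],[d,e,f],[g,h,i]] ∧
    codeB [[a,b,c],[d,e,f],[g,h,i]] < 512 := by decide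

-- ---- the padded-board bridge: tails pass through A's primitives unchanged ----
theorem flip_addTails (x y : Fin 3) (a b c d e f g h i : Bool) (t0 t1 t2 : List Bool) (R : List (List Bool)) :
    pyFlip (addTails t0 t1 t2 R [[a,b,c],[d,e,f],[g,h,i]]) x.val y.val
    = addTails t0 t1 t2 R (pyFlip [[a,b,c],[d,e,f],[g,h,i]] x.val y.val) := by
  fin_cases x <;> fin_cases y <;> rfl

theorem clear_addTails (a b c d e f g h i : Bool) (t0 t1 t2 : List Bool) (R : List (List Bool))
    (ht0 : t0.any id = false) (ht1 : t1.any id = false) (ht2 : t2.any id = false)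
    (hR : R.all (fun k => !(k.any id)) = true) :
    allClearA (addTails t0 t1 t2 R [[a,b,c],[d,e,f],[g,h,i]]) = allClearA [[a,b,c],[d,e,f],[g,h,i]] := by
  simp [allClearA, addTails, List.any_cons, List.all_cons, ht0, ht1, ht2, hR]

theorem flip_P (t0 t1 t2 : List Bool) (R : List (List Bool)) {v : Nat} (hv : v < 512) (x y : Fin 3) :
    pyFlip (addTails t0 t1 t2 R (boardOf v)) x.val y.val
    = addTails t0 t1 t2 R (boardOf (v ^^^ masksB.getD (3*x.val+y.val) 0)) := by
  have h1 := flip_addTails x y (v.testBit 0) (v.testBit 1) (v.testBit 2) (v.testBit 3)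
    (v.testBit 4) (v.testBit 5) (v.testBit 6) (v.testBit 7) (v.testBit 8) t0 t1 t2 R
  have h2 := bfF ⟨v, hv⟩ x y
  exact h1.trans (congrArg (addTails t0 t1 t2 R) h2)

theorem hash_P (t0 t1 t2 : List Bool) (R : List (List Bool)) {v : Nat} (hv : v < 512) :
    pyHash (addTails t0 t1 t2 R (boardOf v)) = (v : Int) := btF ⟨v, hv⟩

theorem clear_P (t0 t1 t2 : List Bool) (R : List (List Bool)) {v : Nat} (hv : v < 512)
    (ht0 : t0.any id = false) (ht1 : t1.any id = false) (ht2 : t2.any id = false)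
    (hR : R.all (fun k => !(k.any id)) = true) :
    allClearA (addTails t0 t1 t2 R (boardOf v)) = (v == 0) := by
  have h1 := clear_addTails (v.testBit 0) (v.testBit 1) (v.testBit 2) (v.testBit 3)
    (v.testBit 4) (v.testBit 5) (v.testBit 6) (v.testBit 7) (v.testBit 8) t0 t1 t2 R ht0 ht1 ht2 hR
  exact h1.trans (bclearF ⟨v, hv⟩)

-- ---- characterisation of bestLoop as a minimum ----
def xstep (s : Nat) : Nat → Nat → Nat := fun v b => if (s >>> b) &&& 1 = 1 then v ^^^ masksB.getD b 0 else v
def kstep (s : Nat) : Nat → Nat → Nat := fun k b => if (s >>> b) &&& 1 = 1 then k + 1 else k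
def ostep (c : Nat) : Nat → Nat → Nat := fun best s => if c ^^^ XB s = 0 ∧ kpop s < best then kpop s else best

theorem pair_fold : ∀ (l : List Nat) (s v0 k0 : Nat),
    l.foldl (fun (vk : Nat × Nat) b =>
      if (s >>> b) &&& 1 = 1 then (vk.1 ^^^ masksB.getD b 0, vk.2 + 1) else vk) (v0, k0)
    = (l.foldl (xstep s) v0, l.foldl (kstep s) k0) := by
  intro l
  induction l with
  | nil => intro s v0 k0; rfl
  | cons b l ih =>
      intro s v0 k0
      rw [List.foldl_cons, List.foldl_cons, List.foldl_cons]
      by_cases h : (s >>> b) &&& 1 = 1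
      · rw [show (if (s >>> b) &&& 1 = 1 then (v0 ^^^ masksB.getD b 0, k0 + 1) else (v0, k0)) = (v0 ^^^ masksB.getD b 0, k0 + 1) from if_pos h,
            show xstep s v0 b = v0 ^^^ masksB.getD b 0 from if_pos h,
            show kstep s k0 b = k0 + 1 from if_pos h, ih]
      · rw [show (if (s >>> b) &&& 1 = 1 then (v0 ^^^ masksB.getD b 0, k0 + 1) else (v0, k0)) = (v0, k0) from if_neg h,
            show xstep s v0 b = v0 from if_neg h,
            show kstep s k0 b = k0 from if_neg h, ih]

theorem xacc : ∀ (l : List Nat) (s a : Nat), l.foldl (xstep s) a = a ^^^ l.foldl (xstep s) 0 := by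
  intro l
  induction l with
  | nil => intro s a; simp
  | cons b l ih =>
      intro s a
      rw [List.foldl_cons, List.foldl_cons]
      by_cases h : (s >>> b) &&& 1 = 1
      · rw [show xstep s a b = a ^^^ masksB.getD b 0 from if_pos h,
            show xstep s 0 b = 0 ^^^ masksB.getD b 0 from if_pos h,
            ih s (a ^^^ masksB.getD b 0), ih s (0 ^^^ masksB.getD b 0), Nat.zero_xor,
            Nat.xor_assoc]
      · rw [show xstep s a b = a from if_neg h, show xstep s 0 b = 0 from if_neg h]
        exact ih s a

theorem innerVal (s c : Nat) :
    (List.range 9).foldl (fun (vk : Nat × Nat) b =>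
      if (s >>> b) &&& 1 = 1 then (vk.1 ^^^ masksB.getD b 0, vk.2 + 1) else vk) (c, 0)
    = (c ^^^ XB s, kpop s) := by
  rw [pair_fold, xacc]
  rfl

theorem foldl_funext {α β : Type} (f g : α → β → α) (h : ∀ a b, f a b = g a b) :
    ∀ (l : List β) (a : α), l.foldl f a = l.foldl g a := by
  have hfg : f = g := funext fun a => funext (h a)
  intro l a; rw [hfg]

theorem bl_eq (c : Nat) : bestLoop c = (List.range 512).foldl (ostep c) 9 := by
  unfold bestLoop
  exact foldl_funext _ _ (fun best s => by rw [innerVal]; rfl) _ 9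

theorem fmin_le_acc (c : Nat) : ∀ (l : List Nat) (acc : Nat), l.foldl (ostep c) acc ≤ acc := by
  intro l
  induction l with
  | nil => intro acc; simp
  | cons s l ih =>
      intro acc
      rw [List.foldl_cons]
      by_cases h : c ^^^ XB s = 0 ∧ kpop s < acc
      · rw [show ostep c acc s = kpop s from if_pos h]
        exact le_trans (ih _) (by omega)
      · rw [show ostep c acc s = acc from if_neg h]
        exact ih acc

theorem fmin_le_hit (c : Nat) : ∀ (l : List Nat) (acc s : Nat), s ∈ l → c ^^^ XB s = 0 →
    l.foldl (ostep c) acc ≤ kpop s := by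
  intro l
  induction l with
  | nil => intro acc s h; simp at h
  | cons t l ih =>
      intro acc s hmem hhit
      rw [List.foldl_cons]
      rcases List.mem_cons.mp hmem with h | h
      · subst h
        by_cases hk : kpop s < acc
        · rw [show ostep c acc s = kpop s from if_pos ⟨hhit, hk⟩]
          exact fmin_le_acc c l _
        · rw [show ostep c acc s = acc from if_neg (fun hc => hk hc.2)]
          exact le_trans (fmin_le_acc c l acc) (by omega)
      · exact ih _ s h hhit

theorem fmin_attain (c : Nat) : ∀ (l : List Nat) (acc : Nat),
    l.foldl (ostep c) acc = acc ∨
    ∃ s ∈ l, c ^^^ XB s = 0 ∧ kpop s = l.foldl (ostep c) acc := by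
  intro l
  induction l with
  | nil => intro acc; left; rfl
  | cons t l ih =>
      intro acc
      rw [List.foldl_cons]
      by_cases h : c ^^^ XB t = 0 ∧ kpop t < acc
      · rw [show ostep c acc t = kpop t from if_pos h]
        rcases ih (kpop t) with h1 | ⟨s, hs, hhit, heq⟩
        · right; exact ⟨t, List.mem_cons_self .., h.1, h1.symm⟩
        · right; exact ⟨s, List.mem_cons_of_mem _ hs, hhit, heq⟩
      · rw [show ostep c acc t = acc from if_neg h]
        rcases ih acc with h1 | ⟨s, hs, hhit, heq⟩
        · left; exact h1
        · right; exact ⟨s, List.mem_cons_of_mem _ hs, hhit, heq⟩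

theorem bl_ub {c s : Nat} (hs : s < 512) (hX : XB s = c) : bestLoop c ≤ kpop s := by
  rw [bl_eq]
  exact fmin_le_hit c _ 9 s (List.mem_range.mpr hs) (by rw [hX, Nat.xor_self])

theorem bl_attain {c : Nat} (hc : c < 512) : ∃ s, s < 512 ∧ XB s = c ∧ kpop s = bestLoop c := by
  have hinv := inv_ok ⟨c, hc⟩
  rcases fmin_attain c (List.range 512) 9 with h9 | ⟨s, hs, hhit, heq⟩
  · refine ⟨invB c, hinv.1, hinv.2, ?_⟩
    have h1 : bestLoop c ≤ kpop (invB c) := bl_ub hinv.1 hinv.2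
    have h2 : kpop (invB c) ≤ 9 := kle ⟨invB c, hinv.1⟩

    have h3 : bestLoop c = 9 := by rw [bl_eq]; exact h9
    omega
  · exact ⟨s, List.mem_range.mp hs, Nat.xor_eq_zero.mp ((Nat.xor_comm _ _) ▸ hhit),
      by rw [bl_eq]; exact heq⟩

theorem kpop_zero : kpop 0 = 0 := by decide

theorem XB_zero : XB 0 = 0 := by decide

theorem bl0 : bestLoop 0 = 0 := by
  have h := bl_ub (c := 0) (s := 0) (by norm_num) XB_zero
  have h2 := kpop_zero
  omega

theorem bl_pos {c : Nat} (hc : c < 512) (h0 : c ≠ 0) : bestLoop c ≠ 0 := by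
  intro hb
  obtain ⟨s, hs, hX, hk⟩ := bl_attain hc
  have hz : kpop s = 0 := by omega
  have hs0 : s = 0 := kzero ⟨s, hs⟩ hz
  exact h0 (by rw [← hX, hs0, XB_zero])

theorem bl_tri {c : Nat} (hc : c < 512) (b : Fin 9) :
    bestLoop c ≤ bestLoop (c ^^^ masksB.getD b.val 0) + 1 := by
  have hc' : c ^^^ masksB.getD b.val 0 < 512 := xor_lt512 hc (masks_lt b)
  obtain ⟨s', hs', hX', hk'⟩ := bl_attain hc'
  have hs : s' ^^^ (1 <<< b.val) < 512 := xor_lt512 hs' (bit_lt b)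
  have hXs : XB (s' ^^^ (1 <<< b.val)) = c := by
    rw [xhom ⟨s', hs'⟩ b, hX', Nat.xor_assoc, Nat.xor_self, Nat.xor_zero]
  have hkpop : kpop (s' ^^^ (1 <<< b.val)) ≤ kpop s' + 1 := by
    by_cases hbit : (s' >>> b.val) &&& 1 = 1
    · have hk1 : kpop (s' ^^^ (1 <<< b.val)) + 1 = kpop s' := kflip_set ⟨s', hs'⟩ b hbit
      omega
    · have hb0 : (s' >>> b.val) &&& 1 = 0 := by
        have := Nat.and_one_is_mod (s' >>> b.val)
        omega
      have hk1 : kpop (s' ^^^ (1 <<< b.val)) = kpop s' + 1 := kflip_unset ⟨s', hs'⟩ b hb0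
      omega
  calc bestLoop c ≤ kpop (s' ^^^ (1 <<< b.val)) := bl_ub hs hXs
    _ ≤ kpop s' + 1 := hkpop
    _ = bestLoop (c ^^^ masksB.getD b.val 0) + 1 := by rw [hk']

theorem bl_dec {c : Nat} (hc : c < 512) (h0 : bestLoop c ≠ 0) :
    ∃ b : Fin 9, bestLoop (c ^^^ masksB.getD b.val 0) + 1 = bestLoop c := by
  obtain ⟨s, hs, hX, hk⟩ := bl_attain hc
  have hs0 : s ≠ 0 := by
    intro h; rw [h, kpop_zero] at hk; omega
  obtain ⟨b, hbit⟩ := exists_bit ⟨s, hs⟩ hs0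
  refine ⟨b, ?_⟩
  have hs' : s ^^^ (1 <<< b.val) < 512 := xor_lt512 hs (bit_lt b)
  have hX' : XB (s ^^^ (1 <<< b.val)) = c ^^^ masksB.getD b.val 0 := by
    rw [xhom ⟨s, hs⟩ b, hX]
  have hkk : kpop (s ^^^ (1 <<< b.val)) + 1 = kpop s := kflip_set ⟨s, hs⟩ b hbit
  have h1 : bestLoop (c ^^^ masksB.getD b.val 0) ≤ kpop (s ^^^ (1 <<< b.val)) := bl_ub hs' hX'
  have h2 := bl_tri hc b
  omega

-- ---- abstract BFS on codes, and its simulation of port A's BFS on padded boards ----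
def expandC (v : Nat) (n : Int) : List (Nat × Nat) → List (Nat × Int) → Sum Int (List (Nat × Int))
  | [], S => .inr S
  | (i, j) :: ps, S =>
      let w := v ^^^ masksB.getD (3*i+j) 0
      if w = 0 then .inl (n + 1) else expandC v n ps (S ++ [(w, n + 1)])

def bfsC : Nat → List (Nat × Int) → List Nat → Int
  | 0, _, _ => 0
  | _ + 1, [], _ => 0
  | f + 1, (v, n) :: S, H =>
      if v ∈ H then bfsC f S H
      else
        match expandC v n pairsA S with
        | .inl r => r
        | .inr S' => bfsC f S' (H ++ [v])

theorem expandC_inr (v : Nat) (n : Int) : ∀ (ps : List (Nat × Nat)) (S : List (Nat × Int)),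
    (∀ p ∈ ps, v ^^^ masksB.getD (3*p.1+p.2) 0 ≠ 0) →
    expandC v n ps S = .inr (S ++ ps.map (fun p => (v ^^^ masksB.getD (3*p.1+p.2) 0, n + 1))) := by
  intro ps
  induction ps with
  | nil => intro S _; simp [expandC]
  | cons p ps ih =>
      intro S h
      obtain ⟨i, j⟩ := p
      have h0 := h (i, j) (List.mem_cons_self ..)
      show (if v ^^^ masksB.getD (3*i+j) 0 = 0 then Sum.inl (n+1) else
        expandC v n ps (S ++ [(v ^^^ masksB.getD (3*i+j) 0, n + 1)])) = _
      rw [if_neg h0, ih _ (fun q hq => h q (List.mem_cons_of_mem _ hq))]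
      simp

theorem expandC_inl (v : Nat) (n : Int) : ∀ (ps : List (Nat × Nat)) (S : List (Nat × Int)),
    (∃ p ∈ ps, v ^^^ masksB.getD (3*p.1+p.2) 0 = 0) →
    expandC v n ps S = .inl (n + 1) := by
  intro ps
  induction ps with
  | nil => intro S h; simp at h
  | cons p ps ih =>
      intro S h
      obtain ⟨i, j⟩ := p
      show (if v ^^^ masksB.getD (3*i+j) 0 = 0 then Sum.inl (n+1) else
        expandC v n ps (S ++ [(v ^^^ masksB.getD (3*i+j) 0, n + 1)])) = _
      by_cases h0 : v ^^^ masksB.getD (3*i+j) 0 = 0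
      · rw [if_pos h0]
      · rw [if_neg h0]
        apply ih
        rcases h with ⟨q, hq, hqz⟩
        rcases List.mem_cons.mp hq with rfl | hq'
        · exact absurd hqz h0
        · exact ⟨q, hq', hqz⟩

def liftQ (t0 t1 t2 : List Bool) (R : List (List Bool)) (S : List (Nat × Int)) :
    List (List (List Bool) × Int) :=
  S.map (fun p => (addTails t0 t1 t2 R (boardOf p.1), p.2))

theorem expandC_codes (v : Nat) (hv : v < 512) (n : Int) :
    ∀ (ps : List (Nat × Nat)) (S S' : List (Nat × Int)),
    (∀ p ∈ ps, p.1 < 3 ∧ p.2 < 3) → (∀ p ∈ S, p.1 < 512) →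
    expandC v n ps S = .inr S' → ∀ p ∈ S', p.1 < 512 := by
  intro ps
  induction ps with
  | nil => intro S S' _ hS he; cases he; exact hS
  | cons p ps ih =>
      intro S S' hps hS he
      obtain ⟨i, j⟩ := p
      have hij := hps (i, j) (List.mem_cons_self ..)
      rw [show expandC v n ((i,j)::ps) S = (if v ^^^ masksB.getD (3*i+j) 0 = 0 then Sum.inl (n+1) else
        expandC v n ps (S ++ [(v ^^^ masksB.getD (3*i+j) 0, n + 1)])) from rfl] at he
      by_cases h0 : v ^^^ masksB.getD (3*i+j) 0 = 0
      · rw [if_pos h0] at he; cases he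
      · rw [if_neg h0] at he
        refine ih _ S' (fun q hq => hps q (List.mem_cons_of_mem _ hq)) ?_ he
        intro q hq
        rcases List.mem_append.mp hq with h | h
        · exact hS q h
        · have : q = (v ^^^ masksB.getD (3*i+j) 0, n+1) := by simpa using h
          rw [this]
          exact xor_lt512 hv (masks_lt ⟨3*i+j, by omega⟩)

theorem expand_sim (t0 t1 t2 : List Bool) (R : List (List Bool))
    (ht0 : t0.any id = false) (ht1 : t1.any id = false) (ht2 : t2.any id = false)
    (hR : R.all (fun k => !(k.any id)) = true)
    (v : Nat) (hv : v < 512) (n : Int) :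
    ∀ (ps : List (Nat × Nat)), (∀ p ∈ ps, p.1 < 3 ∧ p.2 < 3) → ∀ (S : List (Nat × Int)),
    expandA (addTails t0 t1 t2 R (boardOf v)) n ps (liftQ t0 t1 t2 R S)
      = Sum.map id (liftQ t0 t1 t2 R) (expandC v n ps S) := by
  intro ps
  induction ps with
  | nil => intro _ S; rfl
  | cons p ps ih =>
      intro hps S
      obtain ⟨i, j⟩ := p
      have hij := hps (i, j) (List.mem_cons_self ..)
      have hflip : pyFlip (addTails t0 t1 t2 R (boardOf v)) i j
          = addTails t0 t1 t2 R (boardOf (v ^^^ masksB.getD (3*i+j) 0)) :=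
        flip_P t0 t1 t2 R hv ⟨i, hij.1⟩ ⟨j, hij.2⟩
      have hw : v ^^^ masksB.getD (3*i+j) 0 < 512 := xor_lt512 hv (masks_lt ⟨3*i+j, by omega⟩)
      have hclear : allClearA (addTails t0 t1 t2 R (boardOf (v ^^^ masksB.getD (3*i+j) 0))) =
          ((v ^^^ masksB.getD (3*i+j) 0) == 0) := clear_P t0 t1 t2 R hw ht0 ht1 ht2 hR
      show (let m_ := pyFlip (addTails t0 t1 t2 R (boardOf v)) i j
        if allClearA m_ then Sum.inl (n+1)
        else expandA (addTails t0 t1 t2 R (boardOf v)) n ps (liftQ t0 t1 t2 R S ++ [(m_, n + 1)])) = _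
      rw [show expandC v n ((i,j)::ps) S = (if v ^^^ masksB.getD (3*i+j) 0 = 0 then Sum.inl (n+1) else
        expandC v n ps (S ++ [(v ^^^ masksB.getD (3*i+j) 0, n + 1)])) from rfl]
      simp only [hflip, hclear]
      by_cases h0 : v ^^^ masksB.getD (3*i+j) 0 = 0
      · rw [if_pos (by simpa using h0), if_pos h0]; rfl
      · rw [if_neg (by simpa using h0), if_neg h0]
        rw [show liftQ t0 t1 t2 R S ++ [(addTails t0 t1 t2 R (boardOf (v ^^^ masksB.getD (3*i+j) 0)), n + 1)] =
          liftQ t0 t1 t2 R (S ++ [(v ^^^ masksB.getD (3*i+j) 0, n + 1)]) from by simp [liftQ]]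
        exact ih (fun q hq => hps q (List.mem_cons_of_mem _ hq)) _

theorem bfs_sim (t0 t1 t2 : List Bool) (R : List (List Bool))
    (ht0 : t0.any id = false) (ht1 : t1.any id = false) (ht2 : t2.any id = false)
    (hR : R.all (fun k => !(k.any id)) = true) :
    ∀ (f : Nat) (S : List (Nat × Int)) (H : List Nat),
    (∀ p ∈ S, p.1 < 512) → bfsA f (liftQ t0 t1 t2 R S) (H.map Int.ofNat) = bfsC f S H := by
  intro f
  induction f with
  | zero => intro S H _; rfl
  | succ f ih =>
      intro S H hS
      cases S with
      | nil => rfl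
      | cons hd T =>
          obtain ⟨v, n⟩ := hd
          have hv : v < 512 := hS (v, n) (List.mem_cons_self ..)
          have hhash : pyHash (addTails t0 t1 t2 R (boardOf v)) = (v : Int) :=
            hash_P t0 t1 t2 R hv
          have hmem : ((v : Int) ∈ H.map Int.ofNat) ↔ v ∈ H := by
            constructor
            · intro h
              obtain ⟨w, hw, hww⟩ := List.mem_map.mp h
              have : w = v := Int.ofNat.inj hww
              exact this ▸ hw
            · intro h; exact List.mem_map_of_mem h
          show (let hv' := pyHash (addTails t0 t1 t2 R (boardOf v))
            if hv' ∈ H.map Int.ofNat then bfsA f (liftQ t0 t1 t2 R T) (H.map Int.ofNat)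
            else
              match expandA (addTails t0 t1 t2 R (boardOf v)) n pairsA (liftQ t0 t1 t2 R T) with
              | .inl r => r
              | .inr S' => bfsA f S' (H.map Int.ofNat ++ [hv'])) = _
          rw [show bfsC (f+1) ((v,n)::T) H = (if v ∈ H then bfsC f T H else
            match expandC v n pairsA T with
            | .inl r => r
            | .inr S' => bfsC f S' (H ++ [v])) from rfl]
          simp only [hhash]
          by_cases hvH : v ∈ H
          · rw [if_pos (hmem.mpr hvH), if_pos hvH]
            exact ih T H (fun p hp => hS p (List.mem_cons_of_mem _ hp))
          · rw [if_neg (fun h => hvH (hmem.mp h)), if_neg hvH]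
            rw [expand_sim t0 t1 t2 R ht0 ht1 ht2 hR v hv n pairsA pairs_lt T]
            cases hE : expandC v n pairsA T with
            | inl r => rfl
            | inr S' =>
                show bfsA f (liftQ t0 t1 t2 R S') (H.map Int.ofNat ++ [(v : Int)]) = bfsC f S' (H ++ [v])
                rw [show H.map Int.ofNat ++ [(v : Int)] = (H ++ [v]).map Int.ofNat from by simp]
                exact ih S' (H ++ [v])
                  (expandC_codes v hv n pairsA T S' pairs_lt
                    (fun p hp => hS p (List.mem_cons_of_mem _ hp)) hE)

-- ---- the queue invariant and the BFS loop lemma ----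
def qInv (D : Nat) (S : List (Nat × Int)) (H : List Nat) : Prop :=
  (∀ p ∈ S, p.1 ≠ 0 ∧ p.1 < 512 ∧ (D : Int) ≤ p.2 + (bestLoop p.1 : Int)) ∧
  S.Pairwise (fun p q => p.2 ≤ q.2) ∧
  (∀ q ∈ S.head?, ∀ p ∈ S, p.2 ≤ q.2 + 1) ∧
  (∃ p ∈ S, (D : Int) = p.2 + (bestLoop p.1 : Int) ∧ p.1 ∉ H) ∧
  (∀ w ∈ H, w < 512 ∧ ∀ p ∈ S, (D : Int) ≤ p.2 + (bestLoop w : Int)) ∧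
  H.Nodup

theorem child_zero_iff {v : Nat} (hv : v < 512) (h0 : v ≠ 0) :
    (∃ p ∈ pairsA, v ^^^ masksB.getD (3*p.1+p.2) 0 = 0) ↔ bestLoop v = 1 := by
  constructor
  · rintro ⟨p, hp, hz⟩
    have hb : 3*p.1+p.2 < 9 := by have := pairs_lt p hp; omega
    have htri := bl_tri hv ⟨3*p.1+p.2, hb⟩
    rw [hz, bl0] at htri
    have := bl_pos hv h0
    omega
  · intro h1
    obtain ⟨b, hb⟩ := bl_dec hv (by omega)
    have hz0 : bestLoop (v ^^^ masksB.getD b.val 0) = 0 := by omega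
    have hlt := xor_lt512 hv (masks_lt b)
    have hz : v ^^^ masksB.getD b.val 0 = 0 := by
      by_contra hne; exact bl_pos hlt hne hz0
    refine ⟨(b.val / 3, b.val % 3), mem_pairs b, ?_⟩
    have hbb : 3 * (b.val / 3) + b.val % 3 = b.val := by omega
    rw [hbb]
    exact hz

theorem pairwise_trivial {α : Type} {R : α → α → Prop} (h : ∀ a b, R a b) :
    ∀ (l : List α), l.Pairwise R := by
  intro l
  induction l with
  | nil => exact List.Pairwise.nil
  | cons a l ih => exact List.Pairwise.cons (fun b _ => h a b) ih

theorem nodup_len_le {L : List Nat} (h : L.Nodup) (hlt : ∀ x ∈ L, x < 512) :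
    L.length ≤ 512 := by
  have h1 : L.toFinset.card = L.length := List.toFinset_card_of_nodup h
  have h2 : L.toFinset ⊆ Finset.range 512 := by
    intro x hx
    exact Finset.mem_range.mpr (hlt x (List.mem_toFinset.mp hx))
  have := Finset.card_le_card h2
  rw [Finset.card_range] at this
  omega

theorem bfs_loop (D : Nat) : ∀ (f : Nat) (S : List (Nat × Int)) (H : List Nat),
    S.length + 9 * (512 - H.length) < f → qInv D S H → bfsC f S H = (D : Int) := by
  intro f
  induction f with
  | zero => intro S H hm _; omega
  | succ f ih =>
      intro S H hm hInv
      obtain ⟨hAll, hSort, hSpread, ⟨w, hwS, hwOpt, hwH⟩, hH, hNd⟩ := hInv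
      cases S with
      | nil => cases hwS
      | cons hd T =>
          obtain ⟨v, n⟩ := hd
          have hv0 : v ≠ 0 := (hAll (v, n) (List.mem_cons_self ..)).1
          have hv512 : v < 512 := (hAll (v, n) (List.mem_cons_self ..)).2.1
          have hvD : (D : Int) ≤ n + (bestLoop v : Int) := (hAll (v, n) (List.mem_cons_self ..)).2.2
          rw [show bfsC (f+1) ((v,n)::T) H = (if v ∈ H then bfsC f T H else
            match expandC v n pairsA T with
            | .inl r => r
            | .inr S' => bfsC f S' (H ++ [v])) from rfl]
          by_cases hvH : v ∈ H
          · -- the popped board was visited: skip it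
            rw [if_pos hvH]
            have hwT : w ∈ T := by
              rcases List.mem_cons.mp hwS with rfl | h
              · exact absurd hvH hwH
              · exact h
            apply ih T H (by simp only [List.length_cons] at hm; omega)
            refine ⟨fun p hp => hAll p (List.mem_cons_of_mem _ hp),
              (List.pairwise_cons.mp hSort).2, ?_, ⟨w, hwT, hwOpt, hwH⟩,
              fun w' hw' => ⟨(hH w' hw').1, fun p hp => (hH w' hw').2 p (List.mem_cons_of_mem _ hp)⟩,
              hNd⟩
            intro q hq p hp
            have hqT : q ∈ T := List.mem_of_mem_head? hq
            have hnq : n ≤ q.2 := (List.pairwise_cons.mp hSort).1 q hqT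
            have := hSpread (v, n) rfl p (List.mem_cons_of_mem _ hp)
            omega
          · rw [if_neg hvH]
            have hblv := bl_pos hv512 hv0
            by_cases hbv1 : bestLoop v = 1
            · -- a cleared child exists: the loop returns n+1, which equals D
              rw [expandC_inl v n pairsA T ((child_zero_iff hv512 hv0).mpr hbv1)]
              show (n + 1 : Int) = (D : Int)
              have hub : (D : Int) ≤ n + 1 := by rw [hbv1] at hvD; push_cast at hvD ⊢; omega
              have hlb : (n : Int) + 1 ≤ D := by
                rcases List.mem_cons.mp hwS with h | hwT
                · have hw2 : (D : Int) = n + (bestLoop v : Int) := by rw [h] at hwOpt; exact hwOpt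
                  rw [hbv1] at hw2; push_cast at hw2; omega
                · have hn : n ≤ w.2 := (List.pairwise_cons.mp hSort).1 w hwT
                  have hw0 : w.1 ≠ 0 := (hAll w hwS).1
                  have hwlt : w.1 < 512 := (hAll w hwS).2.1
                  have : bestLoop w.1 ≠ 0 := bl_pos hwlt hw0
                  rw [hwOpt]; push_cast; omega
              omega
            · -- every child is still lit: enqueue all nine children
              have hbv2 : 2 ≤ bestLoop v := by omega
              have hnoz : ∀ p ∈ pairsA, v ^^^ masksB.getD (3*p.1+p.2) 0 ≠ 0 := by
                intro p hp hz
                exact hbv1 ((child_zero_iff hv512 hv0).mp ⟨p, hp, hz⟩)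
              rw [expandC_inr v n pairsA T hnoz]
              show bfsC f (T ++ pairsA.map (fun p => (v ^^^ masksB.getD (3*p.1+p.2) 0, n + 1))) (H ++ [v]) = (D : Int)
              set C := pairsA.map (fun p => (v ^^^ masksB.getD (3*p.1+p.2) 0, n + 1)) with hC
              have memC : ∀ q ∈ C, ∃ b : Fin 9, q = (v ^^^ masksB.getD b.val 0, n + 1) := by
                intro q hq
                obtain ⟨p, hp, rfl⟩ := List.mem_map.mp hq
                exact ⟨⟨3*p.1+p.2, by have := pairs_lt p hp; omega⟩, rfl⟩
              have hCfacts : ∀ q ∈ C, q.1 ≠ 0 ∧ q.1 < 512 ∧ q.2 = n + 1 ∧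
                  (D : Int) ≤ q.2 + (bestLoop q.1 : Int) := by
                intro q hq
                obtain ⟨b, rfl⟩ := memC q hq
                have hq512 : v ^^^ masksB.getD b.val 0 < 512 := xor_lt512 hv512 (masks_lt b)
                have hqne : v ^^^ masksB.getD b.val 0 ≠ 0 := by
                  have hbb : 3 * (b.val / 3) + b.val % 3 = b.val := by omega
                  intro hz
                  exact hnoz (b.val / 3, b.val % 3) (mem_pairs b) (by rw [hbb]; exact hz)
                have htri := bl_tri hv512 b
                refine ⟨hqne, hq512, rfl, ?_⟩
                have : (D : Int) ≤ n + (bestLoop v : Int) := hvD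
                push_cast at this ⊢
                omega
              have hTle : ∀ p ∈ T, p.2 ≤ n + 1 := fun p hp =>
                hSpread (v, n) rfl p (List.mem_cons_of_mem _ hp)
              have hTge : ∀ p ∈ T, n ≤ p.2 := (List.pairwise_cons.mp hSort).1
              have hNdv : (H ++ [v]).Nodup := by
                refine hNd.append (List.nodup_singleton v) ?_
                intro a ha hb
                simp only [List.mem_singleton] at hb
                subst hb
                exact hvH ha
              have hHbound : (H ++ [v]).length ≤ 512 := by
                apply nodup_len_le hNdv
                intro x hx
                rcases List.mem_append.mp hx with h | h
                · exact (hH x h).1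
                · simp at h; omega
              apply ih (T ++ C) (H ++ [v])
              · have hClen : C.length = 9 := by
                  rw [hC, List.length_map]; rfl
                have hHlen : H.length ≤ 511 := by
                  rw [List.length_append, List.length_singleton] at hHbound; omega
                rw [List.length_append, hClen, List.length_append, List.length_singleton]
                rw [List.length_cons] at hm
                omega
              · refine ⟨?_, ?_, ?_, ?_, ?_, ?_⟩
                · intro p hp
                  rcases List.mem_append.mp hp with h | h
                  · exact hAll p (List.mem_cons_of_mem _ h)
                  · obtain ⟨h1, h2, _, h4⟩ := hCfacts p h
                    exact ⟨h1, h2, h4⟩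
                · rw [List.pairwise_append]
                  refine ⟨(List.pairwise_cons.mp hSort).2, ?_, ?_⟩
                  · rw [hC, List.pairwise_map]
                    exact pairwise_trivial (fun _ _ => le_refl _) _
                  · intro a ha b hb
                    have := (hCfacts b hb).2.2.1
                    have := hTle a ha
                    omega
                · intro q hq p hp
                  have hq' : q ∈ T ++ C := List.mem_of_mem_head? hq
                  have hqn : n ≤ q.2 := by
                    rcases List.mem_append.mp hq' with h | h
                    · exact hTge q h
                    · have := (hCfacts q h).2.2.1; omega
                  have hpb : p.2 ≤ n + 1 := by
                    rcases List.mem_append.mp hp with h | h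
                    · exact hTle p h
                    · have := (hCfacts p h).2.2.1; omega
                  omega
                · by_cases hopt : (D : Int) = n + (bestLoop v : Int)
                  · obtain ⟨b, hb⟩ := bl_dec hv512 hblv
                    have hbb : 3 * (b.val / 3) + b.val % 3 = b.val := by omega
                    refine ⟨(v ^^^ masksB.getD b.val 0, n + 1), ?_, ?_, ?_⟩
                    · apply List.mem_append_right
                      rw [hC]
                      have : ((v ^^^ masksB.getD b.val 0, n + 1) : Nat × Int) =
                          (fun p : Nat × Nat => (v ^^^ masksB.getD (3*p.1+p.2) 0, n + 1))
                            (b.val / 3, b.val % 3) := by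
                        simp only [hbb]
                      rw [this]
                      exact List.mem_map_of_mem (mem_pairs b)
                    · simp only
                      rw [hopt]
                      push_cast
                      omega
                    · intro hmem
                      rcases List.mem_append.mp hmem with h | h
                      · have := (hH _ h).2 (v, n) (List.mem_cons_self ..)
                        simp only at this
                        rw [hopt] at this
                        push_cast at this
                        omega
                      · have hveq : v ^^^ masksB.getD b.val 0 = v := by simpa using h
                        rw [hveq] at hb
                        omega
                  · have hwT : w ∈ T := by
                      rcases List.mem_cons.mp hwS with h | h
                      · exfalso; apply hopt; rw [h] at hwOpt; exact hwOpt
                      · exact h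
                    refine ⟨w, List.mem_append_left _ hwT, hwOpt, ?_⟩
                    intro hmem
                    rcases List.mem_append.mp hmem with h | h
                    · exact hwH h
                    · have hw1v : w.1 = v := by simpa using h
                      have hn : n ≤ w.2 := hTge w hwT
                      rw [hw1v] at hwOpt
                      omega
                · intro w' hw'
                  rcases List.mem_append.mp hw' with h | h
                  · refine ⟨(hH w' h).1, ?_⟩
                    intro p hp
                    rcases List.mem_append.mp hp with h2 | h2
                    · exact (hH w' h).2 p (List.mem_cons_of_mem _ h2)
                    · have := (hH w' h).2 (v, n) (List.mem_cons_self ..)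
                      have := (hCfacts p h2).2.2.1
                      simp only at *
                      omega
                  · have : w' = v := by simpa using h
                    subst this
                    refine ⟨hv512, ?_⟩
                    intro p hp
                    rcases List.mem_append.mp hp with h2 | h2
                    · have := hTge p h2
                      omega
                    · have := (hCfacts p h2).2.2.1
                      omega
                · exact hNdv

-- ---- glue: all-False boards, falseness of tails, and the final proof ----
theorem any_false {l : List Bool} (h : ∀ c ∈ l, c = false) : l.any id = false := by
  cases hany : l.any id with
  | false => rfl
  | true =>
      obtain ⟨c, hc, hct⟩ := List.any_eq_true.mp hany
      have := h c hc
      simp [this] at hct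

theorem rows_false {R : List (List Bool)} (h : ∀ r ∈ R, ∀ c ∈ r, c = false) :
    R.all (fun k => !(k.any id)) = true := by
  simp only [List.all_eq_true]
  intro r hr
  rw [any_false (h r hr)]
  rfl

theorem allClearB_eq : ∀ (M : List (List Bool)), allClearB M = allClearA M := by
  intro M
  induction M with
  | nil => rfl
  | cons r t ih =>
      simp only [allClearB, allClearA, List.any_cons, List.all_cons, Bool.not_or]
      simp only [allClearB, allClearA] at ih
      rw [ih]

theorem allClear_allFalse {M : List (List Bool)} (h : ∀ r ∈ M, ∀ c ∈ r, c = false) :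
    allClearA M = true := by
  simp only [allClearA, List.all_eq_true]
  intro r hr
  rw [any_false (h r hr)]
  rfl

-- ===== VERDICT (by name: the statement is the Claim_ definition above) =====
theorem solve_spec : Claim_equal_solve := by
  unfold Claim_equal_solve
  intro M _ hPre
  unfold Spec_solve
  rcases hPre with ⟨h3, hrl, hrt, hR⟩ | hAF
  · -- shape branch: destructure M into the 3x3 core and its False padding
    rcases M with _ | ⟨r0, M1⟩
    · simp at h3
    rcases M1 with _ | ⟨r1, M2⟩
    · simp at h3
    rcases M2 with _ | ⟨r2, R⟩
    · simp at h3
    have hm0 : r0 ∈ (r0 :: r1 :: r2 :: R).take 3 := by simp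
    have hm1 : r1 ∈ (r0 :: r1 :: r2 :: R).take 3 := by simp
    have hm2 : r2 ∈ (r0 :: r1 :: r2 :: R).take 3 := by simp
    rcases r0 with _ | ⟨a, r0'⟩
    · have := hrl _ hm0; simp at this
    rcases r0' with _ | ⟨b, r0''⟩
    · have := hrl _ hm0; simp at this
    rcases r0'' with _ | ⟨c, t0⟩
    · have := hrl _ hm0; simp at this
    rcases r1 with _ | ⟨d, r1'⟩
    · have := hrl _ hm1; simp at this
    rcases r1' with _ | ⟨e, r1''⟩
    · have := hrl _ hm1; simp at this
    rcases r1'' with _ | ⟨f, t1⟩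
    · have := hrl _ hm1; simp at this
    rcases r2 with _ | ⟨g, r2'⟩
    · have := hrl _ hm2; simp at this
    rcases r2' with _ | ⟨h, r2''⟩
    · have := hrl _ hm2; simp at this
    rcases r2'' with _ | ⟨i, t2⟩
    · have := hrl _ hm2; simp at this
    -- falseness of the padding
    have ht0 : t0.any id = false := by
      refine any_false ?_
      intro x hx
      exact hrt _ hm0 x (by simpa using hx)
    have ht1 : t1.any id = false := by
      refine any_false ?_
      intro x hx
      exact hrt _ hm1 x (by simpa using hx)
    have ht2 : t2.any id = false := by
      refine any_false ?_
      intro x hx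
      exact hrt _ hm2 x (by simpa using hx)
    have hRf : R.all (fun k => !(k.any id)) = true := by
      refine rows_false ?_
      intro r hr
      exact hR r (by simpa using hr)
    -- the board is addTails of its own code
    obtain ⟨hB, hlt⟩ := idB a b c d e f g h i
    have hMeq : (a::b::c::t0) :: (d::e::f::t1) :: (g::h::i::t2) :: R
        = addTails t0 t1 t2 R (boardOf (codeB ((a::b::c::t0) :: (d::e::f::t1) :: (g::h::i::t2) :: R))) := by
      rw [show codeB ((a::b::c::t0) :: (d::e::f::t1) :: (g::h::i::t2) :: R)
            = codeB [[a,b,c],[d,e,f],[g,h,i]] from rfl, hB]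
      rfl
    set v := codeB ((a::b::c::t0) :: (d::e::f::t1) :: (g::h::i::t2) :: R) with hvdef
    have hv512 : v < 512 := by rw [hvdef]; exact hlt
    have hclearM : allClearA ((a::b::c::t0) :: (d::e::f::t1) :: (g::h::i::t2) :: R) = (v == 0) := by
      rw [hMeq]
      exact clear_P t0 t1 t2 R hv512 ht0 ht1 ht2 hRf
    unfold solve solve_alt
    rw [allClearB_eq, ← hvdef]
    by_cases hv0 : v = 0
    · rw [hclearM, if_pos (by simp [hv0]), if_pos (by simp [hv0])]
    · rw [hclearM, if_neg (by simp [hv0]), if_neg (by simp [hv0])]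
      rw [hMeq]
      rw [show [(addTails t0 t1 t2 R (boardOf v), (0:Int))] = liftQ t0 t1 t2 R [(v, 0)] from rfl]
      rw [show ([] : List Int) = (([] : List Nat)).map Int.ofNat from rfl]
      rw [bfs_sim t0 t1 t2 R ht0 ht1 ht2 hRf 100000 [(v, 0)] []
        (by
          intro p hp
          have hp' : p = (v, (0:Int)) := by simpa using hp
          rw [hp']
          exact hv512)]
      apply bfs_loop (bestLoop v) 100000
      · simp only [List.length_cons, List.length_nil]
        omega
      · refine ⟨?_, ?_, ?_, ?_, ?_, ?_⟩
        · intro p hp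
          have hp' : p = (v, (0:Int)) := by simpa using hp
          rw [hp']
          exact ⟨hv0, hv512, by push_cast; omega⟩
        · exact List.pairwise_singleton _ _
        · intro q hq p hp
          have hq' : q = (v, (0:Int)) := (show (v, (0:Int)) = q by simpa using hq).symm
          have hp' : p = (v, (0:Int)) := by simpa using hp
          rw [hq', hp']
          omega
        · refine ⟨(v, 0), by simp, by push_cast; omega, ?_⟩
          simp
        · intro w hw
          simp at hw
        · exact List.nodup_nil
  · unfold solve solve_alt
    rw [if_pos (allClear_allFalse hAF), allClearB_eq, if_pos (allClear_allFalse hAF)]
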